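-- pv_equiv track=rewrite | github.com/Vedanjalee/Py_CODE | 30Jan/lexicographically_largest_rotation.py | lexicographically_largest_rotation
-- ===== SOURCE A (Python) =====
-- def lexicographically_largest_rotation(s):
--
--     doubled = s + s
--
--     n = len(s)
--     largest_rotation = ""
--
--
--     for i in range(n):
--         rotation = doubled[i:i + n]
--
--         if rotation > largest_rotation:
--             largest_rotation = rotation
--
--     return largest_rotation
-- ===== SOURCE B (Python) =====
-- def lexicographically_largest_rotation(s):
--     best = s
--     cur = s
--     for _ in range(len(s) - 1):
--         cur = cur[1:] + cur[:1]
--         if cur > best: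
--             best = cur
--     return best
-- ===== Notes on version B (the rewrite author's own statement) =====
-- stated objective: alternative
-- what changed: B drops the doubled string and index slicing entirely: it rotates the current string by one character each step and folds the running maximum over these successive rotations.
import Mathlib
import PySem

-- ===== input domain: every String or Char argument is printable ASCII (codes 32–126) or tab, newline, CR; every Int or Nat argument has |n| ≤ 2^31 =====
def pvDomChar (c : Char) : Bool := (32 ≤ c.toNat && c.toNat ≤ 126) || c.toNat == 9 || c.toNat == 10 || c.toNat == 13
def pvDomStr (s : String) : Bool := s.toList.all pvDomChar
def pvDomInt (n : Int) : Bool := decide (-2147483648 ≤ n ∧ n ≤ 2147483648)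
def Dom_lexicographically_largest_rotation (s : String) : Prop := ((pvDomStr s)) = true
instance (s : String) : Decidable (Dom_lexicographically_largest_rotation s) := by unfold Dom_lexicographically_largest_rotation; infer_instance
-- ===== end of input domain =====

-- B replaces A's doubled-string index slicing by rotating the current string one character per
-- step while folding the maximum (objective: alternative; same asymptotic cost).


-- ===== PORT A =====
def lexicographically_largest_rotation (s : String) : String :=
  let doubled := s.toList ++ s.toList
  let n : Int := (s.toList.length : Int)
  String.ofList ((PySem.List.pyRange 0 n 1).foldl
    (fun largest i =>
      let rotation := PySem.List.slice doubled (some i) (some (i + n))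
      if largest < rotation then rotation else largest) [])

-- ===== PORT B =====
def lexicographically_largest_rotation_alt (s : String) : String :=
  let cs := s.toList
  let res := (PySem.List.pyRange 0 ((cs.length : Int) - 1) 1).foldl
    (fun (st : List Char × List Char) _ =>
      let cur := PySem.List.slice st.2 (some 1) none ++ PySem.List.slice st.2 none (some 1)
      (if st.1 < cur then cur else st.1, cur))
    (cs, cs)
  String.ofList res.1

-- ===== PRECONDITION & SPEC =====
def Spec_lexicographically_largest_rotation (s : String) (out : String) : Prop := out = lexicographically_largest_rotation_alt s
instance (s : String) (out : String) : Decidable (Spec_lexicographically_largest_rotation s out) := by unfold Spec_lexicographically_largest_rotation; infer_instance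

-- ===== CLAIM (what is proved, stated in full; the proofs are below) =====
def Claim_equal_lexicographically_largest_rotation : Prop := ∀ (s : String), Dom_lexicographically_largest_rotation s → Spec_lexicographically_largest_rotation s (lexicographically_largest_rotation s)

-- ===== LEMMAS AND PROOFS =====

/-- rotation of `cs` by `i` positions -/
def pvRot (cs : List Char) (i : Nat) : List Char := cs.drop i ++ cs.take i

/-- the shared max-accumulating step -/
def pvMax (b r : List Char) : List Char := if b < r then r else b

theorem pv_sliceA (cs : List Char) (k : Nat) (hk : k ≤ cs.length) :
    PySem.List.slice (cs ++ cs) (some (k : Int)) (some ((k : Int) + (cs.length : Int))) = pvRot cs k := by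
  rw [PySem.List.slice_natCast_add, List.drop_append_of_le_length hk, pvRot]
  have h1 : cs.length = (cs.drop k).length + k := by simp; omega
  rw [h1, List.take_append, List.take_of_length_le (by omega), Nat.add_sub_cancel_left]

theorem pv_rotStep (cs : List Char) (i : Nat) (h : i < cs.length) :
    PySem.List.slice (pvRot cs i) (some 1) none ++ PySem.List.slice (pvRot cs i) none (some 1)
      = pvRot cs (i + 1) := by
  have hto : PySem.List.slice (pvRot cs i) none (some 1) = List.take 1 (pvRot cs i) := by
    rw [PySem.List.slice_to _ (by norm_num)]; norm_num
  rw [PySem.List.slice_from_one, hto]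
  have hd : cs.drop i = cs[i] :: cs.drop (i + 1) := List.drop_eq_getElem_cons h
  have ht : cs.take (i + 1) = cs.take i ++ [cs[i]] := by
    rw [List.take_add_one]; simp [List.getElem?_eq_getElem h]
  rw [pvRot, pvRot, ht, hd]
  simp only [List.cons_append, List.tail_cons, List.take_succ_cons, List.take_zero,
    List.append_assoc, List.nil_append, List.singleton_append]

/-- B's fold, characterised: it folds `pvMax` over successive rotations and tracks the current one. -/
theorem pv_B_fold (cs : List Char) (l : List Int) (i : Nat) (b : List Char)
    (hb : i + l.length ≤ cs.length) :
    l.foldl (fun (st : List Char × List Char) _ =>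
        let cur := PySem.List.slice st.2 (some 1) none ++ PySem.List.slice st.2 none (some 1)
        (if st.1 < cur then cur else st.1, cur)) (b, pvRot cs i)
      = (((List.range l.length).map (fun k => pvRot cs (i + 1 + k))).foldl pvMax b,
          pvRot cs (i + l.length)) := by
  induction l generalizing i b with
  | nil => simp
  | cons a l ih =>
    have hi : i < cs.length := by simp at hb; omega
    simp only [List.foldl_cons, pv_rotStep cs i hi]
    rw [ih (i + 1) _ (by simp at hb ⊢; omega)]
    simp only [List.length_cons, List.range_succ_eq_map, List.map_cons, List.map_map,
      List.foldl_cons, Prod.mk.injEq]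
    refine ⟨?_, by congr 1; omega⟩
    have hmap : List.map (fun k => pvRot cs (i + 1 + 1 + k)) (List.range l.length)
        = List.map ((fun k => pvRot cs (i + 1 + k)) ∘ Nat.succ) (List.range l.length) := by
      apply List.map_congr_left; intro x _
      simp only [Function.comp]; congr 1; omega
    rw [hmap]
    congr 1

theorem pv_main (s : String) :
    lexicographically_largest_rotation s = lexicographically_largest_rotation_alt s := by
  unfold lexicographically_largest_rotation lexicographically_largest_rotation_alt
  set cs := s.toList with hcs
  simp only []
  congr 1
  rcases cs with _ | ⟨c, cs'⟩
  · simp [PySem.List.pyRange_one_eq_nil]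
  · set t := c :: cs' with ht
    have hne : t ≠ [] := by simp [ht]
    have hlen : 1 ≤ t.length := by simp [ht]
    -- A side: fold over range of rotations
    have hA : (PySem.List.pyRange 0 (t.length : Int) 1).foldl
        (fun largest i =>
          let rotation := PySem.List.slice (t ++ t) (some i) (some (i + (t.length : Int)))
          if largest < rotation then rotation else largest) []
        = ((List.range t.length).map (fun k => pvRot t k)).foldl pvMax [] := by
      rw [PySem.List.pyRange_one]
      simp only [sub_zero, Int.toNat_natCast, List.foldl_map]
      apply PySem.List.foldl_congr_mem
      intro acc k hk
      have hk' : k ≤ t.length := le_of_lt (List.mem_range.mp hk)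
      simp only [zero_add, pv_sliceA t k hk', pvMax]
    rw [hA]
    -- B side
    have hB := pv_B_fold t (PySem.List.pyRange 0 ((t.length : Int) - 1) 1) 0 t
      (by rw [PySem.List.length_pyRange_one]; omega)
    have hrot0 : pvRot t 0 = t := by simp [pvRot]
    rw [hrot0] at hB
    rw [hB]
    have hlr : (PySem.List.pyRange 0 ((t.length : Int) - 1) 1).length = t.length - 1 := by
      rw [PySem.List.length_pyRange_one]; omega
    rw [hlr]
    -- split A's list: range (m+1) = 0 :: map (+1) (range m)
    obtain ⟨m, hm⟩ : ∃ m, t.length = m + 1 := ⟨t.length - 1, by omega⟩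
    rw [hm]
    simp only [Nat.add_sub_cancel, List.range_succ_eq_map, List.map_cons, List.map_map,
      List.foldl_cons]
    have hmax0 : pvMax [] (pvRot t 0) = t := by
      rw [hrot0, pvMax, if_pos]
      exact List.nil_lt_cons c cs'
    rw [hmax0]
    congr 1
    apply List.map_congr_left; intro x _
    simp only [Function.comp]; congr 1; omega

-- ===== VERDICT (by name: the statement is the Claim_ definition above) =====
theorem lexicographically_largest_rotation_spec : Claim_equal_lexicographically_largest_rotation := by
  intro s _
  unfold Spec_lexicographically_largest_rotation
  exact pv_main s
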